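-- pv_equiv track=rewrite | github.com/DivyaS18/ProdGuard-Product-Lifecycle-Decline-Risk-Monitoring | ProdGuard.py | consecutive_negative_growth
-- ===== SOURCE A (Python) =====
-- def consecutive_negative_growth(series):
--     count = 0
--     counts = []
--     for value in series:
--         if value < 0:
--             count += 1
--         else:
--             count = 0
--         counts.append(count)
--     return counts
-- ===== SOURCE B (Python) =====
-- def consecutive_negative_growth(series):
--     # Stage 1: run-length encode the series by sign (negative / non-negative).
--     runs = []
--     for v in series:
--         neg = v < 0
--         if runs and runs[-1][0] == neg:
--             runs[-1][1] += 1
--         else: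
--             runs.append([neg, 1])
--     # Stage 2: expand each run; a block of n negatives yields 1..n, others yield zeros.
--     out = []
--     for neg, n in runs:
--         out.extend(range(1, n + 1) if neg else [0] * n)
--     return out
-- ===== Notes on version B (the rewrite author's own statement) =====
-- stated objective: alternative
-- what changed: B is a two-stage pipeline: it first run-length encodes the series by sign, then expands each run (range(1,n+1) for a negative block, n zeros otherwise), instead of A's single pass with a resetting counter.
import Mathlib
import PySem

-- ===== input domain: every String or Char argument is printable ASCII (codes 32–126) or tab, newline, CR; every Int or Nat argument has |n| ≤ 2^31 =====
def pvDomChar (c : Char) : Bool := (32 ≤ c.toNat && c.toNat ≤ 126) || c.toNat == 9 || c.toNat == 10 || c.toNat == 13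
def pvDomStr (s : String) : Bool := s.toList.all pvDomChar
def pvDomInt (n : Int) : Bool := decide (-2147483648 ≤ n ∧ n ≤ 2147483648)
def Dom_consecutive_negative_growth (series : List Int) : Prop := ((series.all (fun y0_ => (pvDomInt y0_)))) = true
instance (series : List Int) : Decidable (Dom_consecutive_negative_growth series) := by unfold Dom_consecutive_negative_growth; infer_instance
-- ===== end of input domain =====

-- ===== PORT A =====
def consecutive_negative_growth (series : List Int) : List Int :=
  (series.foldl (fun (st : Int × List Int) value =>
      let count := if value < 0 then st.1 + 1 else 0
      (count, st.2 ++ [count])) (0, [])).2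

-- ===== PORT B =====
-- B (objective: alternative): two-stage pipeline — run-length encode by sign, then expand each run.
-- 'runs[-1][1] += 1': increment the count of the last run
def cngBump : List (Bool × Int) → List (Bool × Int)
  | [] => []
  | [(b, n)] => [(b, n + 1)]
  | r :: rs => r :: cngBump rs

-- one step of stage 1: extend the runs with one more value
def cngStep (runs : List (Bool × Int)) (v : Int) : List (Bool × Int) :=
  let neg : Bool := decide (v < 0)
  match runs.getLast? with
  | some r => if r.1 == neg then cngBump runs else runs ++ [(neg, 1)]
  | none => runs ++ [(neg, 1)]

-- Stage 1: run-length encode the series by sign (negative / non-negative)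
def cngRuns (series : List Int) : List (Bool × Int) :=
  series.foldl cngStep []

-- Stage 2: expand; a block of n negatives yields 1..n, a block of n others yields n zeros
def consecutive_negative_growth_alt (series : List Int) : List Int :=
  (cngRuns series).foldl (fun out r =>
      out ++ (if r.1 then PySem.List.pyRange 1 (r.2 + 1) 1 else List.replicate r.2.toNat 0)) []

-- ===== PRECONDITION & SPEC =====
def Spec_consecutive_negative_growth (series : List Int) (out : List Int) : Prop := out = consecutive_negative_growth_alt series
instance (series : List Int) (out : List Int) : Decidable (Spec_consecutive_negative_growth series out) := by unfold Spec_consecutive_negative_growth; infer_instance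

-- ===== CLAIM (what is proved, stated in full; the proofs are below) =====
def Claim_equal_consecutive_negative_growth : Prop := ∀ (series : List Int), Dom_consecutive_negative_growth series → Spec_consecutive_negative_growth series (consecutive_negative_growth series)

-- ===== LEMMAS AND PROOFS =====

-- expansion of one run
def cngG (r : Bool × Int) : List Int :=
  if r.1 then PySem.List.pyRange 1 (r.2 + 1) 1 else List.replicate r.2.toNat 0

lemma cngBump_concat (rs : List (Bool × Int)) (b : Bool) (n : Int) :
    cngBump (rs ++ [(b, n)]) = rs ++ [(b, n + 1)] := by
  induction rs with
  | nil => simp [cngBump]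
  | cons r rs ih =>
      cases rs with
      | nil => simp [cngBump]
      | cons r' rs' => simpa [cngBump] using ih

lemma cngStep_none (runs : List (Bool × Int)) (v : Int) (h : runs.getLast? = none) :
    cngStep runs v = runs ++ [(decide (v < 0), 1)] := by
  simp [cngStep, h]

lemma cngStep_same (runs : List (Bool × Int)) (v : Int) (b : Bool) (n : Int)
    (h : runs.getLast? = some (b, n)) (hbe : b = decide (v < 0)) :
    cngStep runs v = cngBump runs := by
  simp [cngStep, h, hbe]

lemma cngStep_diff (runs : List (Bool × Int)) (v : Int) (b : Bool) (n : Int)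
    (h : runs.getLast? = some (b, n)) (hbe : b ≠ decide (v < 0)) :
    cngStep runs v = runs ++ [(decide (v < 0), 1)] := by
  simp [cngStep, h, hbe]

lemma cngG_true_succ (n : Int) (hn : 1 ≤ n) :
    cngG (true, n + 1) = cngG (true, n) ++ [n + 1] := by
  simp only [cngG, if_pos]
  have h : n + 1 + 1 = (n + 1) + 1 := by ring
  rw [h, PySem.List.pyRange_one_succ_right (by omega)]

lemma cngG_false_succ (n : Int) (hn : 1 ≤ n) :
    cngG (false, n + 1) = cngG (false, n) ++ [0] := by
  have h : (n + 1).toNat = n.toNat + 1 := by omega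
  simp [cngG, h, List.replicate_succ']

lemma cngG_single (b : Bool) : cngG (b, 1) = [if b then 1 else 0] := by
  cases b
  · simp [cngG]
  · simp only [cngG]; decide

-- main invariant: A's fold state matches the expansion of B's runs built so far
lemma cng_key (l : List Int) : ∀ (count : Int) (counts : List Int) (runs : List (Bool × Int)),
    counts = runs.flatMap cngG →
    (match runs.getLast? with
     | some (b, n) => count = (if b then n else 0) ∧ 1 ≤ n
     | none => count = 0) →
    (l.foldl (fun (st : Int × List Int) value =>
        let count := if value < 0 then st.1 + 1 else 0
        (count, st.2 ++ [count])) (count, counts)).2 =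
    (l.foldl cngStep runs).flatMap cngG := by
  induction l with
  | nil => intro count counts runs hc _; simpa using hc
  | cons v rest ih =>
      intro count counts runs hc hinv
      simp only [List.foldl_cons]
      cases hrl : runs.getLast? with
      | none =>
          have hre : runs = [] := List.getLast?_eq_none_iff.mp hrl
          rw [hrl] at hinv
          subst hre hinv
          simp only [List.flatMap_nil] at hc
          subst hc
          rw [cngStep_none _ _ hrl]
          apply ih
          · by_cases hv : v < 0 <;> simp [hv, cngG_single]
          · rw [List.nil_append, List.getLast?_singleton]
            by_cases hv : v < 0 <;> simp [hv]
      | some r =>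
          obtain ⟨b, n⟩ := r
          rw [hrl] at hinv
          obtain ⟨hcount, hn1⟩ := hinv
          subst hcount
          have hsplit : runs = runs.dropLast ++ [(b, n)] := by
            conv_lhs => rw [← List.dropLast_append_getLast? _ hrl]
          have hcexp : counts = runs.dropLast.flatMap cngG ++ cngG (b, n) := by
            rw [hc]; conv_lhs => rw [hsplit]
            simp [List.flatMap_append]
          by_cases hbe : b = decide (v < 0)
          · -- same sign: bump the last run
            rw [cngStep_same _ _ _ _ hrl hbe]
            have hbump : cngBump runs = runs.dropLast ++ [(b, n + 1)] := by
              conv_lhs => rw [hsplit]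
              exact cngBump_concat _ _ _
            rw [hbump]
            apply ih
            · rw [hcexp]
              by_cases hv : v < 0
              · have hb : b = true := by rw [hbe]; exact decide_eq_true hv
                subst hb
                simp [hv, cngG_true_succ n hn1, List.flatMap_append]
              · have hb : b = false := by rw [hbe]; exact decide_eq_false hv
                subst hb
                simp [hv, cngG_false_succ n hn1, List.flatMap_append]
            · rw [List.getLast?_concat]
              refine ⟨?_, by omega⟩
              by_cases hv : v < 0
              · have hb : b = true := by rw [hbe]; exact decide_eq_true hv
                subst hb; simp [hv]
              · have hb : b = false := by rw [hbe]; exact decide_eq_false hv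
                subst hb; simp [hv]
          · -- sign changed: start a new run
            rw [cngStep_diff _ _ _ _ hrl hbe]
            apply ih
            · rw [hc]
              by_cases hv : v < 0
              · have hb : b = false := by
                  cases b
                  · rfl
                  · exact absurd (by simp [decide_eq_true hv]) hbe
                subst hb
                simp [hv, List.flatMap_append, cngG_single]
              · have hb : b = true := by
                  cases b
                  · exact absurd (by simp [decide_eq_false hv]) hbe
                  · rfl
                subst hb
                simp [hv, List.flatMap_append, cngG_single]
            · rw [List.getLast?_concat]
              refine ⟨?_, by omega⟩
              by_cases hv : v < 0
              · have hb : b = false := by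
                  cases b
                  · rfl
                  · exact absurd (by simp [decide_eq_true hv]) hbe
                subst hb
                simp [hv]
              · simp [hv]

lemma alt_eq_flatMap (series : List Int) :
    consecutive_negative_growth_alt series = (cngRuns series).flatMap cngG := by
  unfold consecutive_negative_growth_alt
  have h : (fun (out : List Int) (r : Bool × Int) =>
      out ++ (if r.1 then PySem.List.pyRange 1 (r.2 + 1) 1 else List.replicate r.2.toNat 0)) =
      (fun out r => out ++ cngG r) := rfl
  rw [h, PySem.List.foldl_append_eq_flatMap cngG]
  simp

-- ===== VERDICT (by name: the statement is the Claim_ definition above) =====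
theorem consecutive_negative_growth_spec : Claim_equal_consecutive_negative_growth := by
  intro series _
  unfold Spec_consecutive_negative_growth consecutive_negative_growth
  rw [alt_eq_flatMap]
  unfold cngRuns
  exact cng_key series 0 [] [] (by simp) (by simp)
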